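-- pv_equiv track=rewrite | github.com/siggib007/python | IPCalc.py | ConvertMask
-- ===== SOURCE A (Python) =====
-- def ValidateIP(strToCheck):
-- 	Quads = strToCheck.split(".")
-- 	if len(Quads) != 4:
-- 		return False
-- 	# end if
--
-- 	for Q in Quads:
-- 		try:
-- 			iQuad = int(Q)
-- 		except ValueError:
-- 			return False
-- 		# end try
--
-- 		if iQuad > 255 or iQuad < 0:
-- 			return False
-- 		# end if
--
-- 	return True
--
-- def DotDec2Int (strValue):
-- 	strHex = ""
-- 	if ValidateIP(strValue) == False:
-- 		return 0
-- 	# end if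
--
-- 	Quads = strValue.split(".")
-- 	for Q in Quads:
-- 		QuadHex = hex(int(Q))
-- 		strwp = "00"+ QuadHex[2:]
-- 		strHex = strHex + strwp[-2:]
-- 	# next
--
-- 	return int(strHex,16)
--
-- def ValidMask(strToCheck):
-- 	iNumBits=0
-- 	if ValidateIP(strToCheck) == False:
-- 		return 0
-- 	# end if
--
-- 	iDecValue = DotDec2Int(strToCheck)
-- 	strBinary = bin(iDecValue)
--
-- 	strTemp = "0"*32 + strBinary[2:]
-- 	strBinary = strTemp[-32:]
-- 	cBit = strBinary[0]
-- 	bFound = False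
-- 	x=0
-- 	for c in strBinary:
-- 		x=x+1
-- 		if cBit != c:
-- 			iNumBits = x-1
-- 			if bFound:
-- 				return 0
-- 			else:
-- 				cBit=c
-- 				bFound = True
-- 			# end if
-- 		# end if
-- 	# next
-- 	if iNumBits==0:
-- 		iNumBits = x
-- 	# end if
-- 	return iNumBits
--
-- def ConvertMask (strToCheck):
-- 	if ValidMask(strToCheck)==False:
-- 		return "Invalid Mask"
-- 	# end if
-- 	strTemp = ""
-- 	Quads = strToCheck.split(".")
-- 	for Q in Quads:
-- 		if strTemp =="":
-- 			strTemp = str(255-int(Q))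
-- 		else:
-- 			strTemp = strTemp + "." + str(255-int(Q))
-- 		# End if
-- 	#next
-- 	return strTemp
-- ===== SOURCE B (Python) =====
-- def ConvertMask(strToCheck):
--     quads = strToCheck.split(".")
--     if len(quads) != 4:
--         return "Invalid Mask"
--     vals = []
--     for q in quads:
--         try:
--             n = int(q)
--         except ValueError:
--             return "Invalid Mask"
--         if n < 0 or n > 255:
--             return "Invalid Mask"
--         vals.append(n)
--     v = vals[0] * 16777216 + vals[1] * 65536 + vals[2] * 256 + vals[3]
--     # valid iff the 32-bit pattern is a single block: ones-suffix (2**k - 1) or ones-prefix (2**32 - 2**k)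
--     if not any(v == 2 ** k - 1 or v == 2 ** 32 - 2 ** k for k in range(33)):
--         return "Invalid Mask"
--     return ".".join(str(255 - n) for n in vals)
-- ===== Notes on version B (the rewrite author's own statement) =====
-- stated objective: simpler
-- what changed: Replaced the hex-string/DotDec2Int/bin-string/char-scan validity pipeline by one arithmetic pass: fold the four quads into a 32-bit integer and accept exactly the 63 one-block patterns v == 2**k-1 or v == 2**32-2**k (k in 0..32), then join the complemented quads.
import Mathlib
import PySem

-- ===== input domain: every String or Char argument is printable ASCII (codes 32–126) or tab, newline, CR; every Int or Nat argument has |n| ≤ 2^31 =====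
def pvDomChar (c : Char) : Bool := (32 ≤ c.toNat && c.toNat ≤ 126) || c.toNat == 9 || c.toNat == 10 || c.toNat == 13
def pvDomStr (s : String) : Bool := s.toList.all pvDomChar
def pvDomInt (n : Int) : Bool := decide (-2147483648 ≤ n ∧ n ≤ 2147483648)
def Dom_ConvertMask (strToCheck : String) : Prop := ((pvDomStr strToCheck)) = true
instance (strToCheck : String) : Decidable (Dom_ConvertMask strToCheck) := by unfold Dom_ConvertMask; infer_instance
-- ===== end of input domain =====

-- B replaces A's hex-string/bin-string/char-scan mask validation by one arithmetic test
-- (the folded 32-bit value must be 2^k-1 or 2^32-2^k); objective: simpler.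

-- ===== PORT A =====

-- Python hex(n): PySem has no hex(); hand-ported step for step, exact for every int
-- ("0x"+lowercase digits, '-' in front for negatives — Nat.toDigits 16 yields lowercase like CPython).
def pyHex (n : Int) : List Char :=
  if n < 0 then '-' :: '0' :: 'x' :: Nat.toDigits 16 n.natAbs
  else '0' :: 'x' :: Nat.toDigits 16 n.toNat

-- int(s, 16), hand-ported as the plain left-to-right digit fold; exact for nonempty strings of
-- hex digits with no sign/whitespace/underscore/'0x' prefix — the only strings DotDec2Int ever
-- builds (strHex is a concatenation of two-hex-digit pairs).  none = ValueError.
def hexDigitVal? (c : Char) : Option Nat :=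
  if '0' ≤ c ∧ c ≤ '9' then some (c.toNat - 48)
  else if 'a' ≤ c ∧ c ≤ 'f' then some (c.toNat - 87)
  else if 'A' ≤ c ∧ c ≤ 'F' then some (c.toNat - 55)
  else none

def hexValGo : List Char → Nat → Option Nat
  | [], acc => some acc
  | c :: cs, acc =>
    match hexDigitVal? c with
    | none => none
    | some d => hexValGo cs (16 * acc + d)

def pyInt16? (cs : List Char) : Option Nat :=
  if cs = [] then none else hexValGo cs 0

-- for Q in Quads: int(Q) bounds loop of ValidateIP
def validateIPLoop : List (List Char) → Bool
  | [] => true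
  | q :: qs =>
    match PySem.Int.ofChars? q with
    | none => false                                   -- except ValueError: return False
    | some iQuad => if iQuad > 255 ∨ iQuad < 0 then false else validateIPLoop qs

def ValidateIP (s : List Char) : Bool :=
  let quads := PySem.Chars.splitOn s ['.']            -- strToCheck.split(".")
  if quads.length ≠ 4 then false else validateIPLoop quads

-- for Q in Quads: strHex = strHex + ("00" + hex(int(Q))[2:])[-2:]
def dotDecLoop : List (List Char) → List Char → List Char
  | [], strHex => strHex
  | q :: qs, strHex =>
    let quadHex := pyHex ((PySem.Int.ofChars? q).getD 0)   -- int(Q): ValidateIP passed, cannot raise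
    let strwp := ['0', '0'] ++ PySem.List.slice quadHex (some 2) none
    dotDecLoop qs (strHex ++ PySem.List.slice strwp (some (-2)) none)

def DotDec2Int (s : List Char) : Int :=
  if ValidateIP s = false then 0
  else
    let quads := PySem.Chars.splitOn s ['.']
    let strHex := dotDecLoop quads []
    ((pyInt16? strHex).map (Int.ofNat)).getD 0        -- int(strHex,16): never none here (8 hex digits)

-- the for c in strBinary loop of ValidMask, with the trailing "if iNumBits==0: iNumBits=x" fold-out
def validMaskLoop : List Char → Char → Bool → Int → Int → Int
  | [], _, _, iNumBits, x => if iNumBits = 0 then x else iNumBits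
  | c :: cs, cBit, bFound, iNumBits, x =>
    let x' := x + 1
    if cBit ≠ c then
      if bFound then 0 else validMaskLoop cs c true (x' - 1) x'
    else validMaskLoop cs cBit bFound iNumBits x'

def ValidMask (s : List Char) : Int :=
  if ValidateIP s = false then 0
  else
    let iDecValue := DotDec2Int s
    let strBinary := PySem.Int.toBinChars0b iDecValue      -- bin(iDecValue)
    let strTemp := List.replicate 32 '0' ++ PySem.List.slice strBinary (some 2) none
    let strBinary2 := PySem.List.slice strTemp (some (-32)) none
    match PySem.List.pyGet? strBinary2 0 with              -- cBit = strBinary[0]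
    | none => 0                                            -- IndexError: unreachable (length 32)
    | some cBit => validMaskLoop strBinary2 cBit false 0 0

-- for Q in Quads of ConvertMask, building strTemp
def convertLoop : List (List Char) → List Char → List Char
  | [], strTemp => strTemp
  | q :: qs, strTemp =>
    let n := (PySem.Int.ofChars? q).getD 0                 -- int(Q): mask is valid, cannot raise
    if strTemp = [] then convertLoop qs (PySem.Int.toChars (255 - n))
    else convertLoop qs (strTemp ++ '.' :: PySem.Int.toChars (255 - n))

def ConvertMask (strToCheck : String) : String :=
  if ValidMask strToCheck.toList = 0 then "Invalid Mask"   -- ValidMask(..)==False ⟺ result is 0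
  else String.ofList (convertLoop (PySem.Chars.splitOn strToCheck.toList ['.']) [])

-- ===== PORT B =====

-- the quad-collecting loop of B (none = the early "Invalid Mask" returns)
def altParse : List (List Char) → List Int → Option (List Int)
  | [], vals => some vals
  | q :: qs, vals =>
    match PySem.Int.ofChars? q with
    | none => none
    | some n => if n < 0 ∨ n > 255 then none else altParse qs (vals ++ [n])

def ConvertMask_alt (strToCheck : String) : String :=
  let quads := PySem.Chars.splitOn strToCheck.toList ['.']
  if quads.length ≠ 4 then "Invalid Mask"
  else
    match altParse quads [] with
    | none => "Invalid Mask"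
    | some vals =>
      let v := PySem.List.pyGetD vals 0 0 * 16777216 + PySem.List.pyGetD vals 1 0 * 65536 +
               PySem.List.pyGetD vals 2 0 * 256 + PySem.List.pyGetD vals 3 0
      if ¬ ((PySem.List.pyRange 0 33 1).any fun k =>
              (v == 2 ^ k.toNat - 1) || (v == 2 ^ 32 - 2 ^ k.toNat)) then "Invalid Mask"
      else String.ofList (PySem.Chars.join ['.'] (vals.map fun n => PySem.Int.toChars (255 - n)))

-- ===== PRECONDITION & SPEC =====
def Spec_ConvertMask (strToCheck : String) (out : String) : Prop := out = ConvertMask_alt strToCheck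
instance (strToCheck : String) (out : String) : Decidable (Spec_ConvertMask strToCheck out) := by unfold Spec_ConvertMask; infer_instance

-- ===== CLAIM (what is proved, stated in full; the proofs are below) =====
def Claim_equal_ConvertMask : Prop := ∀ (strToCheck : String), Dom_ConvertMask strToCheck → Spec_ConvertMask strToCheck (ConvertMask strToCheck)

-- ===== LEMMAS AND PROOFS =====

-- ---- proof-side vocabulary ----

-- number of adjacent differing pairs in a char list
def transC : List Char → Nat
  | a :: b :: r => (if a ≠ b then 1 else 0) + transC (b :: r)
  | _ => 0

-- the L-bit big-endian binary rendering of n (with leading zeros)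
def bitsL : Nat → Nat → List Char
  | 0, _ => []
  | L + 1, n => bitsL L (n / 2) ++ [if n % 2 = 1 then '1' else '0']

-- value of a big-endian bit string
def bval (cs : List Char) : Nat :=
  cs.foldl (fun acc c => 2 * acc + (if c = '1' then 1 else 0)) 0

-- the two-hex-char pair DotDec2Int appends for a quad of value n
def hpI (n : Int) : List Char :=
  PySem.List.slice (['0', '0'] ++ PySem.List.slice (pyHex n) (some 2) none) (some (-2)) none

-- ---- parsing: validateIPLoop vs altParse ----

lemma pa_false : ∀ (qs : List (List Char)) (acc : List Int),
    validateIPLoop qs = false → altParse qs acc = none := by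
  intro qs
  induction qs with
  | nil => intro acc h; simp [validateIPLoop] at h
  | cons q qs ih =>
    intro acc h
    simp only [validateIPLoop, altParse] at *
    cases hq : PySem.Int.ofChars? q with
    | none => simp
    | some n =>
      simp only [hq] at h ⊢
      by_cases hb : n > 255 ∨ n < 0
      · simp [(by omega : n < 0 ∨ n > 255)]
      · simp only [if_neg hb] at h
        have : ¬ (n < 0 ∨ n > 255) := by omega
        simp [this, ih _ h]

lemma pa_true : ∀ (qs : List (List Char)) (acc : List Int),
    validateIPLoop qs = true →
    altParse qs acc = some (acc ++ qs.map fun q => (PySem.Int.ofChars? q).getD 0) := by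
  intro qs
  induction qs with
  | nil => intro acc h; simp [altParse]
  | cons q qs ih =>
    intro acc h
    simp only [validateIPLoop] at h
    cases hq : PySem.Int.ofChars? q with
    | none => simp [hq] at h
    | some n =>
      simp only [hq] at h
      by_cases hb : n > 255 ∨ n < 0
      · simp [hb] at h
      · simp only [if_neg hb] at h
        have : ¬ (n < 0 ∨ n > 255) := by omega
        simp [altParse, hq, this, ih _ h]

lemma pa_bounds : ∀ (qs : List (List Char)), validateIPLoop qs = true →
    ∀ q ∈ qs, ∃ n : Int, PySem.Int.ofChars? q = some n ∧ 0 ≤ n ∧ n ≤ 255 := by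
  intro qs
  induction qs with
  | nil => intro _ q hq; simp at hq
  | cons p qs ih =>
    intro h q hq
    simp only [validateIPLoop] at h
    cases hp : PySem.Int.ofChars? p with
    | none => simp [hp] at h
    | some n =>
      simp only [hp] at h
      by_cases hb : n > 255 ∨ n < 0
      · simp [hb] at h
      · simp only [if_neg hb] at h
        rcases List.mem_cons.mp hq with rfl | hq
        · exact ⟨n, hp, by omega, by omega⟩
        · exact ih h q hq

-- ---- hex pairs and pyInt16? ----

lemma hexValGo_acc : ∀ (cs : List Char) (acc : Nat),
    hexValGo cs acc = (hexValGo cs 0).map (fun r => acc * 16 ^ cs.length + r) := by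
  intro cs
  induction cs with
  | nil => intro acc; simp [hexValGo]
  | cons c cs ih =>
    intro acc
    simp only [hexValGo]
    cases hd : hexDigitVal? c with
    | none => simp
    | some d =>
      show hexValGo cs (16 * acc + d) = Option.map (fun r => acc * 16 ^ (c :: cs).length + r) (hexValGo cs (16 * 0 + d))
      rw [ih (16 * acc + d), ih (16 * 0 + d)]
      cases hexValGo cs 0 with
      | none => simp
      | some r => simp only [Option.map_some, Option.some.injEq, List.length_cons]; ring

lemma hexValGo_append (xs ys : List Char) (acc : Nat) :
    hexValGo (xs ++ ys) acc = (hexValGo xs acc).bind (fun a => hexValGo ys a) := by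
  induction xs generalizing acc with
  | nil => simp [hexValGo]
  | cons c cs ih =>
    simp only [List.cons_append, hexValGo]
    cases _hd : hexDigitVal? c with
    | none => simp
    | some d => exact ih _

set_option maxRecDepth 10000 in
lemma hp_small : ∀ m : Nat, m < 256 →
    (hpI (Int.ofNat m)).length = 2 ∧ hexValGo (hpI (Int.ofNat m)) 0 = some m := by
  decide

lemma hp_val (m : Nat) (hm : m < 256) (acc : Nat) :
    hexValGo (hpI (Int.ofNat m)) acc = some (256 * acc + m) := by
  rcases hp_small m hm with ⟨hlen, hval⟩
  rw [hexValGo_acc, hval, hlen]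
  simp; ring

-- ---- binary strings ----

lemma bitsL_length : ∀ (L n : Nat), (bitsL L n).length = L := by
  intro L
  induction L with
  | zero => intro n; rfl
  | succ L ih => intro n; simp [bitsL, ih]

lemma bitsL_zero : ∀ L : Nat, bitsL L 0 = List.replicate L '0' := by
  intro L
  induction L with
  | zero => rfl
  | succ L ih =>
    simp [bitsL, ih, List.replicate_succ' ]

lemma bitsL_chars : ∀ (L n : Nat), ∀ c ∈ bitsL L n, c = '0' ∨ c = '1' := by
  intro L
  induction L with
  | zero => intro n c hc; simp [bitsL] at hc
  | succ L ih =>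
    intro n c hc
    rcases List.mem_append.mp hc with h | h
    · exact ih _ c h
    · simp at h; split at h <;> simp [h]

-- the padded last-32-chars of bin(n) is bitsL
lemma pad_toDigits : ∀ (L n : Nat), 1 ≤ L → n < 2 ^ L →
    List.replicate (L - (Nat.toDigits 2 n).length) '0' ++ Nat.toDigits 2 n = bitsL L n := by
  intro L
  induction L with
  | zero => omega
  | succ L ih =>
    intro n _ hn
    by_cases hL : L = 0
    · subst hL
      have h2 : n < 2 := by simpa using hn
      interval_cases n <;> decide
    · by_cases hsm : n < 2
      · rw [Nat.toDigits_of_lt_base hsm]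
        have h0 : n / 2 = 0 := by omega
        simp only [bitsL, h0, bitsL_zero, List.length_singleton]
        congr 1
        interval_cases n <;> decide
      · rw [Nat.toDigits_eq_if (by norm_num), if_neg (by omega)]
        have hdiv : n / 2 < 2 ^ L := by
          rw [Nat.div_lt_iff_lt_mul (by norm_num : 0 < 2)]
          calc n < 2 ^ (L + 1) := hn
          _ = 2 ^ L * 2 := by ring
        have hlen : 0 < (Nat.toDigits 2 (n / 2)).length := Nat.length_toDigits_pos
        have : L + 1 - ((Nat.toDigits 2 (n / 2)).length + 1) = L - (Nat.toDigits 2 (n / 2)).length := by omega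
        rw [List.length_append, List.length_singleton, this, ← List.append_assoc,
          ih (n / 2) (by omega) hdiv]
        simp only [bitsL]
        congr 1
        have : n % 2 < 2 := Nat.mod_lt _ (by norm_num)
        interval_cases h : n % 2 <;> simp [Nat.digitChar]

-- ---- values of bit strings ----

lemma bval_go_zero (j : Nat) (acc : Nat) :
    List.foldl (fun acc c => 2 * acc + (if c = '1' then 1 else 0)) acc (List.replicate j '0')
      = acc * 2 ^ j := by
  induction j generalizing acc with
  | zero => simp
  | succ j ih =>
    rw [List.replicate_succ, List.foldl_cons, ih]
    simp only [if_neg (by decide : ¬ ('0' = '1'))]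
    ring

lemma bval_go_one_aux (j : Nat) : ∀ acc : Nat,
    List.foldl (fun acc c => 2 * acc + (if c = '1' then 1 else 0)) acc (List.replicate j '1') + 1
      = (acc + 1) * 2 ^ j := by
  induction j with
  | zero => intro acc; simp
  | succ j ih =>
    intro acc
    rw [List.replicate_succ, List.foldl_cons]
    norm_num
    rw [ih]
    ring

lemma bval_go_one (j : Nat) (acc : Nat) :
    List.foldl (fun acc c => 2 * acc + (if c = '1' then 1 else 0)) acc (List.replicate j '1')
      = (acc + 1) * 2 ^ j - 1 := by
  have := bval_go_one_aux j acc
  omega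

lemma bval_bitsL : ∀ (L n : Nat), n < 2 ^ L →
    ∀ acc, List.foldl (fun acc c => 2 * acc + (if c = '1' then 1 else 0)) acc (bitsL L n)
      = acc * 2 ^ L + n := by
  intro L
  induction L with
  | zero =>
    intro n hn acc
    interval_cases n
    simp [bitsL]
  | succ L ih =>
    intro n hn acc
    have hdiv : n / 2 < 2 ^ L := by
      rw [Nat.div_lt_iff_lt_mul (by norm_num : 0 < 2)]
      calc n < 2 ^ (L + 1) := hn
      _ = 2 ^ L * 2 := by ring
    simp only [bitsL, List.foldl_append, ih (n / 2) hdiv acc, List.foldl_cons, List.foldl_nil]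
    have hm : n % 2 < 2 := Nat.mod_lt _ (by norm_num)
    have hnd : 2 * (n / 2) + n % 2 = n := Nat.div_add_mod ..
    interval_cases h : n % 2 <;> simp <;> ring_nf <;> omega

-- ---- transition counting ----

lemma transC_zero : ∀ (r : List Char) (a : Char),
    transC (a :: r) = 0 → a :: r = List.replicate (r.length + 1) a := by
  intro r
  induction r with
  | nil => intro a _; rfl
  | cons b r ih =>
    intro a h
    simp only [transC] at h
    by_cases hab : a = b
    · subst hab
      rw [List.replicate_succ]
      simp only [List.cons.injEq, true_and]
      exact ih a (by simpa using h)
    · simp [hab] at h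

lemma transC_shape : ∀ (r : List Char) (a : Char), transC (a :: r) ≤ 1 →
    ∃ i j b, a :: r = List.replicate (i + 1) a ++ List.replicate j b := by
  intro r
  induction r with
  | nil => intro a _; exact ⟨0, 0, 'x', by simp⟩
  | cons d r ih =>
    intro a h
    by_cases had : a = d
    · subst had
      have h' : transC (a :: r) ≤ 1 := by simpa [transC] using h
      obtain ⟨i, j, b, hb⟩ := ih a h'
      exact ⟨i + 1, j, b, by rw [List.replicate_succ]; simp [hb]⟩
    · have h0 : transC (d :: r) = 0 := by
        simp only [transC, if_pos had] at h
        omega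
      refine ⟨0, r.length + 1, d, ?_⟩
      rw [transC_zero r d h0]
      simp

-- masks with at most one transition are exactly the one-block values
lemma low_trans_val : ∀ N : Nat, N < 2 ^ 32 → transC (bitsL 32 N) ≤ 1 →
    ∃ k ≤ 32, N = 2 ^ k - 1 ∨ N = 2 ^ 32 - 2 ^ k := by
  intro N hN htr
  have hlen : (bitsL 32 N).length = 32 := bitsL_length 32 N
  obtain ⟨a, r, har⟩ : ∃ a r, bitsL 32 N = a :: r := by
    cases h : bitsL 32 N with
    | nil => rw [h] at hlen; simp at hlen
    | cons a r => exact ⟨a, r, rfl⟩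
  obtain ⟨i, j, b, heq⟩ := transC_shape r a (by rw [← har]; exact htr)
  have key : bitsL 32 N = List.replicate (i + 1) a ++ List.replicate j b := har.trans heq
  have hlen2 : i + 1 + j = 32 := by
    have := congrArg List.length key
    simp [hlen] at this
    omega
  have ha : a = '0' ∨ a = '1' := by
    refine bitsL_chars 32 N a ?_
    rw [har]; exact List.mem_cons_self
  have hval := bval_bitsL 32 N hN 0
  rw [key, List.foldl_append] at hval
  simp only [zero_mul, zero_add] at hval
  rcases Nat.eq_zero_or_pos j with hj | hj
  · subst hj
    simp only [List.replicate_zero, List.foldl_nil] at hval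
    rcases ha with rfl | rfl
    · rw [bval_go_zero] at hval
      exact ⟨0, by omega, Or.inl (by omega)⟩
    · rw [bval_go_one] at hval
      refine ⟨32, le_refl _, Or.inl ?_⟩
      have hi : i + 1 = 32 := by omega
      rw [← hval, hi]
      omega
  · have hb : b = '0' ∨ b = '1' := by
      refine bitsL_chars 32 N b ?_
      rw [key]
      refine List.mem_append_right _ ?_
      exact List.mem_replicate.mpr ⟨by omega, rfl⟩
    have h32 : 2 ^ (i + 1) * 2 ^ j = 2 ^ 32 := by
      rw [← pow_add, hlen2]
    rcases ha with rfl | rfl <;> rcases hb with rfl | rfl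
    · rw [bval_go_zero, bval_go_zero] at hval
      exact ⟨0, by omega, Or.inl (by omega)⟩
    · rw [bval_go_zero, bval_go_one] at hval
      exact ⟨j, by omega, Or.inl (by omega)⟩
    · rw [bval_go_one, bval_go_zero] at hval
      norm_num at hval
      refine ⟨j, by omega, Or.inr ?_⟩
      rw [← hval, Nat.sub_mul, one_mul, h32]
    · rw [bval_go_one, bval_go_one] at hval
      norm_num at hval
      refine ⟨32, le_refl _, Or.inl ?_⟩
      rw [← hval]
      have h1 : (1:Nat) ≤ 2 ^ (i + 1) := Nat.one_le_two_pow
      have h2 : (2 ^ (i + 1) - 1 + 1) * 2 ^ j = 2 ^ 32 := by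
        rw [Nat.sub_add_cancel h1, h32]
      omega

set_option maxHeartbeats 1000000 in
lemma one_block_low_trans : ∀ k ≤ 32, transC (bitsL 32 (2 ^ k - 1)) ≤ 1 ∧ transC (bitsL 32 (2 ^ 32 - 2 ^ k)) ≤ 1 := by
  decide

-- ---- the scan loop of ValidMask ----

lemma scan_eq_zero : ∀ (cs : List Char) (cBit : Char) (bFound : Bool) (iNumBits x : Int),
    0 ≤ iNumBits → 0 ≤ x → 1 ≤ x + cs.length →
    (validMaskLoop cs cBit bFound iNumBits x = 0 ↔ (if bFound then 1 else 2) ≤ transC (cBit :: cs)) := by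
  intro cs
  induction cs with
  | nil =>
    intro cBit bFound iNumBits x h1 h2 h3
    simp only [validMaskLoop]
    have ht : transC [cBit] = 0 := rfl
    rw [ht]
    simp only [List.length_nil] at h3
    constructor
    · intro h
      split at h <;> omega
    · intro h
      split at h <;> omega
  | cons c cs ih =>
    intro cBit bFound iNumBits x h1 h2 h3
    simp only [validMaskLoop]
    by_cases hc : cBit = c
    · subst hc
      rw [if_neg (by simp)]
      rw [ih cBit bFound iNumBits (x + 1) h1 (by omega) (by simp at h3 ⊢; omega)]
      have h2t : transC (cBit :: cBit :: cs) = transC (cBit :: cs) := by simp [transC]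
      rw [h2t]
    · rw [if_pos (by simpa using hc)]
      have htr : transC (cBit :: c :: cs) = 1 + transC (c :: cs) := by simp [transC, hc]
      cases bFound with
      | true =>
        rw [htr]
        norm_num
      | false =>
        rw [if_neg (by simp)]
        have hx : x + 1 - 1 = x := by omega
        rw [hx, ih c true x (x + 1) h2 (by omega) (by simp at h3 ⊢; omega), htr]
        norm_num
        omega

-- ---- assembling A's pipeline ----

lemma toChars_ne_nil (n : Int) : PySem.Int.toChars n ≠ [] := by
  unfold PySem.Int.toChars
  split
  · simp
  · have := @Nat.length_toDigits_pos 10 n.toNat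
    intro h
    rw [h] at this
    simp at this

lemma ofNat_toNat_eq {n : Int} (h : 0 ≤ n) : Int.ofNat n.toNat = n := by
  rw [Int.ofNat_eq_natCast]
  omega

lemma DotDec2Int_val (s : List Char) (q0 q1 q2 q3 : List Char) (n0 n1 n2 n3 : Int)
    (hsp : PySem.Chars.splitOn s ['.'] = [q0, q1, q2, q3])
    (hvip : ValidateIP s = true)
    (h0 : PySem.Int.ofChars? q0 = some n0) (h0b : 0 ≤ n0 ∧ n0 ≤ 255)
    (h1 : PySem.Int.ofChars? q1 = some n1) (h1b : 0 ≤ n1 ∧ n1 ≤ 255)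
    (h2 : PySem.Int.ofChars? q2 = some n2) (h2b : 0 ≤ n2 ∧ n2 ≤ 255)
    (h3 : PySem.Int.ofChars? q3 = some n3) (h3b : 0 ≤ n3 ∧ n3 ≤ 255) :
    DotDec2Int s = Int.ofNat (((n0.toNat * 256 + n1.toNat) * 256 + n2.toNat) * 256 + n3.toNat) := by
  unfold DotDec2Int
  rw [hvip]
  simp only [Bool.true_eq_false, if_false, hsp]
  have hloop : dotDecLoop [q0, q1, q2, q3] []
      = ((hpI n0 ++ hpI n1) ++ hpI n2) ++ hpI n3 := by
    simp [dotDecLoop, hpI, h0, h1, h2, h3, List.append_assoc]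
  rw [hloop]
  have e0 : hpI n0 = hpI (Int.ofNat n0.toNat) := by rw [ofNat_toNat_eq h0b.1]
  have e1 : hpI n1 = hpI (Int.ofNat n1.toNat) := by rw [ofNat_toNat_eq h1b.1]
  have e2 : hpI n2 = hpI (Int.ofNat n2.toNat) := by rw [ofNat_toNat_eq h2b.1]
  have e3 : hpI n3 = hpI (Int.ofNat n3.toNat) := by rw [ofNat_toNat_eq h3b.1]
  have b0 : n0.toNat < 256 := by omega
  have b1 : n1.toNat < 256 := by omega
  have b2 : n2.toNat < 256 := by omega
  have b3 : n3.toNat < 256 := by omega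
  have hne : ((hpI n0 ++ hpI n1) ++ hpI n2) ++ hpI n3 ≠ [] := by
    intro h
    have h0' : hpI (Int.ofNat n0.toNat) = [] := by
      rw [← e0]
      exact (List.append_eq_nil_iff.mp (List.append_eq_nil_iff.mp (List.append_eq_nil_iff.mp h).1).1).1
    have hll := (hp_small n0.toNat b0).1
    rw [h0'] at hll
    simp at hll
  unfold pyInt16?
  rw [if_neg hne]
  rw [e0, e1, e2, e3, hexValGo_append, hexValGo_append, hexValGo_append]
  rw [hp_val n0.toNat b0]
  simp only [Option.bind_some]
  rw [hp_val n1.toNat b1]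
  simp only [Option.bind_some]
  rw [hp_val n2.toNat b2]
  simp only [Option.bind_some]
  rw [hp_val n3.toNat b3]
  simp only [Option.map_some, Option.getD_some, Int.ofNat_eq_natCast]
  norm_num
  ring_nf

lemma ValidMask_eq_zero_iff (s : List Char) (N : Nat)
    (hvip : ValidateIP s = true) (hdd : DotDec2Int s = Int.ofNat N) (hN : N < 2 ^ 32) :
    (ValidMask s = 0 ↔ 2 ≤ transC (bitsL 32 N)) := by
  unfold ValidMask
  rw [hvip]
  simp only [Bool.true_eq_false, if_false, hdd]
  have hnn : ¬ (Int.ofNat N < 0) := by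
    rw [Int.ofNat_eq_natCast]
    omega
  have hbin : PySem.Int.toBinChars0b (Int.ofNat N) = '0' :: 'b' :: Nat.toDigits 2 N := by
    unfold PySem.Int.toBinChars0b
    rw [if_neg hnn]
    simp
  rw [hbin]
  have hsl2 : PySem.List.slice ('0' :: 'b' :: Nat.toDigits 2 N) (some 2) none
      = Nat.toDigits 2 N := by
    rw [PySem.List.slice_from _ (by norm_num : (0:Int) ≤ 2)]
    rfl
  rw [hsl2]
  have hdlen : (Nat.toDigits 2 N).length ≤ 32 :=
    (Nat.length_toDigits_le_iff (by norm_num) (by norm_num)).mpr hN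
  have hsl32 : PySem.List.slice (List.replicate 32 '0' ++ Nat.toDigits 2 N) (some (-32)) none
      = bitsL 32 N := by
    rw [PySem.List.slice_from_neg_ofNat _ 32 (by norm_num)]
    rw [List.length_append, List.length_replicate]
    have harith : 32 + (Nat.toDigits 2 N).length - 32 = (Nat.toDigits 2 N).length := by omega
    rw [harith, List.drop_append_of_le_length (by simp; omega), List.drop_replicate]
    exact pad_toDigits 32 N (by norm_num) hN
  rw [hsl32]
  have hlen : (bitsL 32 N).length = 32 := bitsL_length 32 N
  obtain ⟨a, r, har⟩ : ∃ a r, bitsL 32 N = a :: r := by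
    cases h : bitsL 32 N with
    | nil => rw [h] at hlen; simp at hlen
    | cons a r => exact ⟨a, r, rfl⟩
  rw [har, PySem.List.pyGet?_zero_cons]
  rw [scan_eq_zero (a :: r) a false 0 0 (by omega) (by omega) (by simp)]
  have : transC (a :: a :: r) = transC (a :: r) := by simp [transC]
  simp only [if_neg (by simp : ¬ (false = true)), this]

-- ===== VERDICT (by name: the statement is the Claim_ definition above) =====
theorem ConvertMask_spec : Claim_equal_ConvertMask := by
  intro s _
  unfold Spec_ConvertMask ConvertMask ConvertMask_alt
  by_cases hlen : (PySem.Chars.splitOn s.toList ['.']).length = 4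
  · obtain ⟨q0, q1, q2, q3, hsp⟩ := List.length_eq_four.mp hlen
    by_cases hvl : validateIPLoop [q0, q1, q2, q3] = true
    · -- all four quads parse to ints in [0, 255]
      have hvip : ValidateIP s.toList = true := by
        unfold ValidateIP
        rw [hsp]
        simpa using hvl
      obtain ⟨n0, h0, h0l, h0r⟩ := pa_bounds _ hvl q0 (by simp)
      obtain ⟨n1, h1, h1l, h1r⟩ := pa_bounds _ hvl q1 (by simp)
      obtain ⟨n2, h2, h2l, h2r⟩ := pa_bounds _ hvl q2 (by simp)
      obtain ⟨n3, h3, h3l, h3r⟩ := pa_bounds _ hvl q3 (by simp)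
      set N : Nat := ((n0.toNat * 256 + n1.toNat) * 256 + n2.toNat) * 256 + n3.toNat with hNdef
      have hN : N < 2 ^ 32 := by rw [hNdef]; omega
      have hdd := DotDec2Int_val s.toList q0 q1 q2 q3 n0 n1 n2 n3 hsp hvip
        h0 ⟨h0l, h0r⟩ h1 ⟨h1l, h1r⟩ h2 ⟨h2l, h2r⟩ h3 ⟨h3l, h3r⟩
      have hVM := ValidMask_eq_zero_iff s.toList N hvip hdd hN
      have halt : altParse [q0, q1, q2, q3] [] = some [n0, n1, n2, n3] := by
        rw [pa_true _ _ hvl]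
        simp [h0, h1, h2, h3]
      have hv : PySem.List.pyGetD [n0, n1, n2, n3] 0 0 * 16777216 +
          PySem.List.pyGetD [n0, n1, n2, n3] 1 0 * 65536 +
          PySem.List.pyGetD [n0, n1, n2, n3] 2 0 * 256 +
          PySem.List.pyGetD [n0, n1, n2, n3] 3 0 = Int.ofNat N := by
        simp only [PySem.List.pyGetD_ofNat', List.getD]
        rw [Int.ofNat_eq_natCast, hNdef]
        push_cast
        simp only [List.getElem?_cons_zero, List.getElem?_cons_succ, Option.getD_some]
        omega
      have hiff : ((PySem.List.pyRange 0 33 1).any fun k =>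
            (Int.ofNat N == 2 ^ k.toNat - 1) || (Int.ofNat N == 2 ^ 32 - 2 ^ k.toNat)) = true
          ↔ transC (bitsL 32 N) ≤ 1 := by
        constructor
        · intro h
          obtain ⟨k, hkmem, hpk⟩ := List.any_eq_true.mp h
          have hkb : 0 ≤ k ∧ k < 33 := PySem.List.mem_pyRange_one.mp hkmem
          have hcast : ((2:Int)) ^ k.toNat = ((2 ^ k.toNat : Nat) : Int) := by push_cast; ring
          have hone : 1 ≤ (2 ^ k.toNat : Nat) := Nat.one_le_two_pow
          have hle : (2 ^ k.toNat : Nat) ≤ 2 ^ 32 :=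
            Nat.pow_le_pow_right (by norm_num) (by omega)
          simp only [Bool.or_eq_true, beq_iff_eq, Int.ofNat_eq_natCast, hcast] at hpk
          have hNk : N = 2 ^ k.toNat - 1 ∨ N = 2 ^ 32 - 2 ^ k.toNat := by omega
          have hkk : k.toNat ≤ 32 := by omega
          rcases hNk with hNk | hNk
          · rw [hNk]; exact (one_block_low_trans k.toNat hkk).1
          · rw [hNk]; exact (one_block_low_trans k.toNat hkk).2
        · intro h
          obtain ⟨k, hk, hNk⟩ := low_trans_val N hN h
          refine List.any_eq_true.mpr ⟨(k : Int), PySem.List.mem_pyRange_one.mpr ⟨by omega, by omega⟩, ?_⟩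
          have hcast : ((2:Int)) ^ ((k : Int)).toNat = ((2 ^ k : Nat) : Int) := by
            rw [Int.toNat_natCast]; push_cast; ring
          have hone : 1 ≤ (2 ^ k : Nat) := Nat.one_le_two_pow
          have hle : (2 ^ k : Nat) ≤ 2 ^ 32 := Nat.pow_le_pow_right (by norm_num) hk
          simp only [Bool.or_eq_true, beq_iff_eq, Int.ofNat_eq_natCast, hcast]
          omega
      simp only [hsp, halt, hv]
      by_cases hok : transC (bitsL 32 N) ≤ 1
      · -- valid mask on both sides
        rw [if_neg (by rw [hVM]; omega)]
        rw [if_neg (by simp [List.length_cons]), if_neg (not_not_intro (hiff.mpr hok))]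
        have hcl : convertLoop [q0, q1, q2, q3] [] =
            ((PySem.Int.toChars (255 - n0) ++ '.' :: PySem.Int.toChars (255 - n1)) ++
              '.' :: PySem.Int.toChars (255 - n2)) ++ '.' :: PySem.Int.toChars (255 - n3) := by
          simp [convertLoop, h0, h1, h2, h3, toChars_ne_nil]
        rw [hcl]
        have hj : PySem.Chars.join ['.'] ([n0, n1, n2, n3].map fun n => PySem.Int.toChars (255 - n)) =
            ((PySem.Int.toChars (255 - n0) ++ '.' :: PySem.Int.toChars (255 - n1)) ++
              '.' :: PySem.Int.toChars (255 - n2)) ++ '.' :: PySem.Int.toChars (255 - n3) := by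
          simp [PySem.Chars.join, List.intercalate, List.intersperse, List.append_assoc]
        rw [hj]
      · -- too many transitions: both report an invalid mask
        rw [if_pos (hVM.mpr (by omega))]
        rw [if_neg (by simp [List.length_cons])]
        have : ¬ ((PySem.List.pyRange 0 33 1).any fun k =>
            (Int.ofNat N == 2 ^ k.toNat - 1) || (Int.ofNat N == 2 ^ 32 - 2 ^ k.toNat)) = true := by
          rw [hiff]; omega
        rw [if_pos (by simpa using this)]
    · -- some quad fails to parse: both report an invalid mask
      have hvip : ValidateIP s.toList = false := by
        unfold ValidateIP
        rw [hsp]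
        simpa using (Bool.not_eq_true _).mp hvl
      have hvm : ValidMask s.toList = 0 := by
        unfold ValidMask
        rw [hvip]
        simp
      rw [if_pos hvm, hsp]
      simp [pa_false _ _ ((Bool.not_eq_true _).mp hvl)]
  · -- wrong number of quads: both report an invalid mask
    have hvip : ValidateIP s.toList = false := by
      unfold ValidateIP
      simp [hlen]
    have hvm : ValidMask s.toList = 0 := by
      unfold ValidMask
      rw [hvip]
      simp
    rw [if_pos hvm]
    simp [hlen]
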